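-- pv_equiv track=rewrite | github.com/reach4help/reach4help | map/parse_scripts/india/pan_india/2_data_parse.py | extract_categories_and_headers
-- ===== SOURCE A (Python) =====
-- def extract_categories_and_headers(row):
--     categories = [
--         "Medicines",
--         "Oxygen",
--         "Hospital Beds",
--         "Plasma / Blood",
--         "Tiffin Services",
--         "Quarantine Centres",
--         "Other",
--     ]
--
--     headers = []
--     categories_and_headers = []
--     cat_number = 0
--
--     for header in row:
--
--         if header != "":
--             headers.append(header)
--         else:
--
--             categories_and_headers.append([categories[cat_number], headers])
--             if cat_number < len(categories) - 1:
--                 cat_number += 1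
--             headers = []
--
--     categories_and_headers.append([categories[cat_number], headers])
--     return categories_and_headers
-- ===== SOURCE B (Python) =====
-- def extract_categories_and_headers(row):
--     categories = [
--         "Medicines",
--         "Oxygen",
--         "Hospital Beds",
--         "Plasma / Blood",
--         "Tiffin Services",
--         "Quarantine Centres",
--         "Other",
--     ]
--     # positions of the empty cells = the group boundaries
--     bounds = [i for i, h in enumerate(row) if h == ""]
--     # slice the row between consecutive boundaries (and the two ends)
--     groups = [row[a + 1:b] for a, b in zip([-1] + bounds, bounds + [len(row)])]
--     # label list padded with the last category; zip truncates to len(groups)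
--     labels = categories + [categories[-1]] * len(groups)
--     return [[lab, g] for lab, g in zip(labels, groups)]
-- ===== Notes on version B (the rewrite author's own statement) =====
-- stated objective: alternative
-- what changed: Instead of A's single stateful loop with a mutable headers buffer and a capped running category counter, B computes the index positions of the empty cells, slices the row between consecutive boundary indices to get the groups, and zips them against a category list padded with its last element (zip truncation does the clamping).
import Mathlib
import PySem

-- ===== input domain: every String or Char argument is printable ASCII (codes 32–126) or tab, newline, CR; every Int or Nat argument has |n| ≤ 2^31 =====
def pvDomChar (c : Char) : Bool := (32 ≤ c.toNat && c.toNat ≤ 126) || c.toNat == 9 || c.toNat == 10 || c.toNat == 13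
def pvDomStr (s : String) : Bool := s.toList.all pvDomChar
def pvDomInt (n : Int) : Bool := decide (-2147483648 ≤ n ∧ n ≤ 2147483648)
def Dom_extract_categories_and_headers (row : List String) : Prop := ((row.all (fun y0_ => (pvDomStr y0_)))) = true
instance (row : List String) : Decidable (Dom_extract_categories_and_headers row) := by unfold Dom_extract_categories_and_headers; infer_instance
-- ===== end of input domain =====

-- B replaces A's single stateful loop (mutable headers buffer, capped running category counter)
-- by computing the boundary indices of the empty cells, slicing the row between consecutive
-- boundaries, and zipping the slices against a padded label list; objective: alternative.


-- ===== PORT A =====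
-- the categories list shared by both Pythons
def pvCategories : List String :=
  ["Medicines", "Oxygen", "Hospital Beds", "Plasma / Blood",
   "Tiffin Services", "Quarantine Centres", "Other"]

-- A's for-loop as structural recursion over the row carrying (headers, accumulated result, cat_number)
def aLoop : List String → List String → List (String × List String) → Nat → List (String × List String)
  | [], headers, acc, cat => acc ++ [(pvCategories.getD cat "", headers)]
  | h :: rest, headers, acc, cat =>
    if h ≠ "" then
      aLoop rest (headers ++ [h]) acc cat
    else
      aLoop rest [] (acc ++ [(pvCategories.getD cat "", headers)])
        (if cat < pvCategories.length - 1 then cat + 1 else cat)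

def extract_categories_and_headers (row : List String) : List (String × List String) :=
  aLoop row [] [] 0

-- ===== PORT B =====
-- Source B: bounds = [i for i, h in enumerate(row) if h == ""]
def bBounds (row : List String) : List Int :=
  ((PySem.List.enumerate row 0).filter (fun p => p.2 == "")).map (fun p => p.1)

-- Source B: groups = [row[a+1:b] for a, b in zip([-1] + bounds, bounds + [len(row)])]
def bGroups (row : List String) : List (List String) :=
  (List.zip ((-1) :: bBounds row) (bBounds row ++ [(row.length : Int)])).map
    (fun p => PySem.List.slice row (some (p.1 + 1)) (some p.2))

-- Source B: labels = categories + [categories[-1]] * len(groups); return [[lab,g] for lab,g in zip(labels, groups)]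
-- (categories[-1] on the nonempty literal list never raises, so pyGet? is some; getD unwraps it)
def extract_categories_and_headers_alt (row : List String) : List (String × List String) :=
  (pvCategories ++ List.replicate (bGroups row).length
      ((PySem.List.pyGet? pvCategories (-1)).getD "")).zip (bGroups row)

-- ===== PRECONDITION & SPEC =====
def Spec_extract_categories_and_headers (row : List String) (out : List (String × List String)) : Prop := out = extract_categories_and_headers_alt row
instance (row : List String) (out : List (String × List String)) : Decidable (Spec_extract_categories_and_headers row out) := by unfold Spec_extract_categories_and_headers; infer_instance

-- ===== CLAIM (what is proved, stated in full; the proofs are below) =====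
def Claim_equal_extract_categories_and_headers : Prop := ∀ (row : List String), Dom_extract_categories_and_headers row → Spec_extract_categories_and_headers row (extract_categories_and_headers row)

-- ===== LEMMAS AND PROOFS =====

-- proof-side reference split, recursive on the head of the row
def splitE : List String → List (List String)
  | [] => [[]]
  | h :: rest =>
    if h = "" then [] :: splitE rest
    else
      match splitE rest with
      | g :: gs => (h :: g) :: gs
      | [] => [[h]]   -- unreachable

-- proof-side reference label pairing with running index
def enumPair : Nat → List (List String) → List (String × List String)
  | _, [] => []
  | i, g :: gs => (pvCategories.getD (min i 6) "", g) :: enumPair (i + 1) gs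

theorem splitE_ne_nil (row : List String) : splitE row ≠ [] := by
  cases row with
  | nil => simp [splitE]
  | cons h rest =>
    simp only [splitE]
    split
    · simp
    · cases splitE rest <;> simp

theorem splitE_exists (row : List String) : ∃ g gs, splitE row = g :: gs := by
  cases hrest : splitE row with
  | nil => exact absurd hrest (splitE_ne_nil row)
  | cons g gs => exact ⟨g, gs, rfl⟩

-- ---- A side: invariant for A's loop ----
theorem aLoop_eq (row : List String) :
    ∀ (headers : List String) (acc : List (String × List String)) (i : Nat),
      aLoop row headers acc (min i 6) =
        acc ++ ((pvCategories.getD (min i 6) "", headers ++ (splitE row).headD []) ::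
                enumPair (i + 1) (splitE row).tail) := by
  induction row with
  | nil =>
    intro headers acc i
    simp [aLoop, splitE, enumPair]
  | cons h rest ih =>
    intro headers acc i
    by_cases hh : h = ""
    · subst hh
      have h7 : pvCategories.length = 7 := rfl
      have hcap : (if min i 6 < pvCategories.length - 1 then min i 6 + 1 else min i 6)
          = min (i + 1) 6 := by
        rw [h7]; split <;> omega
      simp only [aLoop, ne_eq, not_true_eq_false, if_false, hcap]
      rw [ih [] (acc ++ [(pvCategories.getD (min i 6) "", headers)]) (i + 1)]
      obtain ⟨g, gs, hsp⟩ := splitE_exists rest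
      simp [splitE, hsp, enumPair, h7]
    · simp only [aLoop, if_pos (by exact hh)]
      rw [ih (headers ++ [h]) acc i]
      obtain ⟨g, gs, hsp⟩ := splitE_exists rest
      simp [splitE, hsp, if_neg hh]

-- ---- B side ----
-- positions of the empty cells, as naturals
def bnds : List String → List Nat
  | [] => []
  | h :: rest => if h = "" then 0 :: (bnds rest).map (· + 1) else (bnds rest).map (· + 1)

-- the port's enumerate/filter/map comprehension computes exactly those positions (shifted by the start)
theorem bounds_from (row : List String) :
    ∀ (s : Int),
      ((PySem.List.enumerate row s).filter (fun p => p.2 == "")).map (fun p => p.1) =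
        (bnds row).map (fun n : Nat => s + (n : Int)) := by
  induction row with
  | nil => intro s; simp [PySem.List.enumerate_nil, bnds]
  | cons h rest ih =>
    intro s
    by_cases hh : h = ""
    · subst hh
      simp only [PySem.List.enumerate_cons, List.filter_cons, bnds, if_pos rfl]
      simp only [beq_self_eq_true, if_true, List.map_cons, ih (s + 1), List.map_map]
      refine List.cons_eq_cons.mpr ⟨by ring, ?_⟩
      apply List.map_congr_left
      intro n _
      simp only [Function.comp_apply]
      push_cast
      ring
    · simp only [PySem.List.enumerate_cons, List.filter_cons, bnds, if_neg hh]
      have : (h == "") = false := by simp [hh]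
      simp only [this, Bool.false_eq_true, if_false, ih (s + 1), List.map_map]
      apply List.map_congr_left
      intro n _
      simp only [Function.comp]
      push_cast
      ring

theorem bBounds_eq (row : List String) :
    bBounds row = (bnds row).map (fun n : Nat => (n : Int)) := by
  simpa using bounds_from row 0

-- the group at a natural (start, stop) pair
def natGroup (row : List String) (p : Nat × Nat) : List String :=
  (row.drop p.1).take (p.2 - p.1)

-- nat-level groups
def natGroups (row : List String) : List (List String) :=
  (List.zip (0 :: (bnds row).map (· + 1)) (bnds row ++ [row.length])).map (natGroup row)

-- the port's Int/slice computation equals the nat-level one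
theorem bGroups_eq_natGroups (row : List String) : bGroups row = natGroups row := by
  unfold bGroups natGroups
  rw [bBounds_eq]
  have h1 : (-1 : Int) :: (bnds row).map (fun n : Nat => (n : Int)) =
      (0 :: (bnds row).map (· + 1)).map (fun a : Nat => (a : Int) - 1) := by
    simp only [List.map_cons, List.map_map]
    refine List.cons_eq_cons.mpr ⟨by norm_num, ?_⟩
    apply List.map_congr_left
    intro n _
    simp only [Function.comp]
    push_cast
    ring
  have h2 : (bnds row).map (fun n : Nat => (n : Int)) ++ [(row.length : Int)] =
      (bnds row ++ [row.length]).map (fun b : Nat => (b : Int)) := by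
    simp
  rw [h1, h2, List.zip_map, List.map_map]
  apply List.map_congr_left
  intro p _
  simp only [Function.comp, Prod.map, natGroup]
  have : (p.1 : Int) - 1 + 1 = (p.1 : Int) := by ring
  rw [this, PySem.List.slice_natCast]

-- shifting every index pair by one steps past the head of the row
theorem natGroup_shift (h : String) (rest : List String) (p : Nat × Nat) :
    natGroup (h :: rest) (p.1 + 1, p.2 + 1) = natGroup rest p := by
  simp [natGroup]

-- the nat-level groups are exactly the reference split
theorem natGroups_eq_splitE (row : List String) : natGroups row = splitE row := by
  induction row with
  | nil => simp [natGroups, bnds, splitE, natGroup]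
  | cons h rest ih =>
    by_cases hh : h = ""
    · subst hh
      unfold natGroups
      simp only [bnds, eq_self_iff_true, if_true, List.map_cons, List.length_cons]
      have hB : (bnds rest).map (· + 1) ++ [rest.length + 1] =
          (bnds rest ++ [rest.length]).map (· + 1) := by simp
      simp only [List.cons_append, List.zip_cons_cons, List.map_cons, List.map_map, hB, List.zip_map]
      have hA2 : ((0:Nat) + 1) :: List.map ((fun x : Nat => x + 1) ∘ fun x => x + 1) (bnds rest) =
          List.map (fun x : Nat => x + 1) (0 :: List.map (fun x => x + 1) (bnds rest)) := by
        simp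
      rw [hA2, List.zip_map, List.map_map]
      have hgrp : ∀ p ∈ List.zip (0 :: (bnds rest).map (· + 1)) (bnds rest ++ [rest.length]),
          ((fun p => natGroup ("" :: rest) p) ∘ Prod.map (· + 1) (· + 1)) p = natGroup rest p := by
        intro p _
        simpa [Prod.map] using natGroup_shift "" rest p
      rw [List.map_congr_left hgrp]
      have : natGroup ("" :: rest) (0, 0) = [] := by simp [natGroup]
      rw [this]
      have := ih
      unfold natGroups at this
      rw [this]
      simp [splitE]
    · unfold natGroups
      simp only [bnds, if_neg hh, List.length_cons]
      cases hb : bnds rest with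
      | nil =>
        have hrest : splitE rest = [rest] := by
          rw [← ih]; unfold natGroups; rw [hb]
          simp [natGroup, List.take_length]
        simp only [hb, List.map_nil, List.nil_append, List.zip_cons_cons, List.zip_nil_left,
          List.map_cons, List.map_nil]
        simp [splitE, hrest, if_neg hh, natGroup, List.take_length]
      | cons b0 bs =>
        obtain ⟨g, gs, hsp⟩ := splitE_exists rest
        have hrest := ih
        rw [hsp] at hrest
        unfold natGroups at hrest
        rw [hb] at hrest
        simp only [List.map_cons, List.cons_append, List.zip_cons_cons, List.map_cons] at hrest
        obtain ⟨hg, hgs⟩ := List.cons_eq_cons.mp hrest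
        simp only [List.map_cons, List.cons_append, List.zip_cons_cons, List.map_cons,
          List.length_cons]
        have hred : splitE (h :: rest) = (h :: g) :: gs := by
          unfold splitE
          rw [if_neg hh, hsp]
        rw [hred]
        refine List.cons_eq_cons.mpr ⟨?_, ?_⟩
        · rw [← hg]
          simp [natGroup, List.take_succ_cons]
        · have hB : bs.map (· + 1) ++ [rest.length + 1] = (bs ++ [rest.length]).map (· + 1) := by
            simp
          have hA : (b0 + 1 + 1) :: (bs.map (· + 1)).map (· + 1) =
              ((b0 + 1) :: bs.map (· + 1)).map (· + 1) := by simp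
          rw [hB, hA, List.zip_map, List.map_map, ← hgs]
          apply List.map_congr_left
          intro p _
          simpa [Prod.map] using natGroup_shift h rest p

-- labels padded with "Other", zipped against any group list, give the enumerated capped pairing
theorem zip_labels (gs : List (List String)) :
    ∀ (i k : Nat), gs.length ≤ (pvCategories.drop i).length + k →
      (pvCategories.drop i ++ List.replicate k "Other").zip gs = enumPair i gs := by
  induction gs with
  | nil => intro i k _; simp [enumPair]
  | cons g gs ih =>
    intro i k hlen
    by_cases hi : i < 7
    · have hdrop : pvCategories.drop i = pvCategories[i] :: pvCategories.drop (i + 1) := by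
        exact List.drop_eq_getElem_cons (by simpa [pvCategories] using hi)
      have hgetD : pvCategories[i]'(by simpa [pvCategories] using hi) = pvCategories.getD (min i 6) "" := by
        interval_cases i <;> rfl
      rw [hdrop, List.cons_append, List.zip_cons_cons, enumPair, ← hgetD]
      congr 1
      apply ih
      have h7 : pvCategories.length = 7 := rfl
      simp only [List.length_drop, List.length_cons, h7] at hlen ⊢
      omega
    · have hdrop : pvCategories.drop i = [] := by
        apply List.drop_eq_nil_of_le
        have h7 : pvCategories.length = 7 := rfl
        omega
      have hdrop' : pvCategories.drop (i + 1) = [] := by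
        apply List.drop_eq_nil_of_le
        have h7 : pvCategories.length = 7 := rfl
        omega
      have h7 : pvCategories.length = 7 := rfl
      have hk : 1 ≤ k := by
        simp only [List.length_drop, List.length_cons, h7] at hlen; omega
      obtain ⟨k', rfl⟩ : ∃ k', k = k' + 1 := ⟨k - 1, by omega⟩
      rw [hdrop, List.nil_append, List.replicate_succ, List.zip_cons_cons, enumPair]
      have hmin : min i 6 = 6 := by omega
      rw [hmin]
      have : (pvCategories.getD 6 "") = "Other" := rfl
      rw [this]
      congr 1
      have := ih (i + 1) k' (by
        simp only [List.length_drop, List.length_cons, h7] at hlen ⊢; omega)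
      rw [hdrop', List.nil_append] at this
      exact this

-- ===== VERDICT (by name: the statement is the Claim_ definition above) =====
theorem extract_categories_and_headers_spec : Claim_equal_extract_categories_and_headers := by
  intro row _
  unfold Spec_extract_categories_and_headers extract_categories_and_headers extract_categories_and_headers_alt
  have hA := aLoop_eq row [] [] 0
  norm_num at hA
  have hG : bGroups row = splitE row := by
    rw [bGroups_eq_natGroups, natGroups_eq_splitE]
  have hOther : ((PySem.List.pyGet? pvCategories (-1)).getD "") = "Other" := by decide
  rw [hA, hG, hOther]
  have hz := zip_labels (splitE row) 0 (splitE row).length (by simp)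
  simp only [List.drop_zero] at hz
  rw [hz]
  obtain ⟨g, gs, hsp⟩ := splitE_exists row
  simp [hsp, enumPair, pvCategories]
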